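-- pv_equiv track=rewrite | github.com/sakkiii/MultiAV2 | multiav/scannerstrategy.py | _get_lowest_work_time_and_machines_to_start_from_times_touple_list
-- ===== SOURCE A (Python) =====
-- def _get_lowest_work_time_and_machines_to_start_from_times_touple_list(times):
--     amount_of_machines = times[0][0]
--     work_to_finish_queue = times[0][1]
--     amount_of_times = len(times)
--
--     for i in range(0, amount_of_times):
--         machines_to_start, time_to_finish_queue = times[amount_of_times - 1 - i]
--
--         if amount_of_times -1 -i -1 >= 0:
--             machines_to_start_prev, time_to_finish_queue_prev = times[amount_of_times - 1 - i - 1]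
--             if time_to_finish_queue_prev > time_to_finish_queue:
--                 amount_of_machines = machines_to_start
--                 work_to_finish_queue = time_to_finish_queue
--
--     return amount_of_machines, work_to_finish_queue
-- ===== SOURCE B (Python) =====
-- def _get_lowest_work_time_and_machines_to_start_from_times_touple_list(times):
--     machines, work = times[0]
--     for prev, cur in zip(times, times[1:]):
--         if prev[1] > cur[1]:
--             machines, work = cur
--             break
--     return machines, work
-- ===== Notes on version B (the rewrite author's own statement) =====
-- stated objective: simpler
-- what changed: A scans the whole list backward, overwriting the result at every adjacent descent so the last overwrite (the first descent in list order) wins; B does one forward pass over consecutive pairs and stops at the first descent, returning that pair's element (or times[0] if the list is non-decreasing).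
import Mathlib
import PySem

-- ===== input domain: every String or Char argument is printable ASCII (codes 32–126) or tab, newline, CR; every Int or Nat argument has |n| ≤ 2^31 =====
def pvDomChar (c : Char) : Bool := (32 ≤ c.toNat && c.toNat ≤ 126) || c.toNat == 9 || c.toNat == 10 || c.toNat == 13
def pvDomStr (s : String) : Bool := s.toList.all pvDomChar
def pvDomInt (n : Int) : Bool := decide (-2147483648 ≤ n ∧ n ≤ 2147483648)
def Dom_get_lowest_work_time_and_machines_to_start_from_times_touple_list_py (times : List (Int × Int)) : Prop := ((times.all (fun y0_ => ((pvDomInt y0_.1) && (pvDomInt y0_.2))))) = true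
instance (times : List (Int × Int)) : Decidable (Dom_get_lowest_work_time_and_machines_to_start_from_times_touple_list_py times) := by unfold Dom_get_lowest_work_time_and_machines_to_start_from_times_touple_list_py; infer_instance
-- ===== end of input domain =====

-- B replaces A's full backward overwrite-scan with a forward scan over adjacent pairs that
-- stops at the first descent (objective: simpler).


-- ===== PORT A =====
def get_lowest_work_time_and_machines_to_start_from_times_touple_list_py (times : List (Int × Int)) : Int × Int :=
  let amount_of_machines : Int := (PySem.List.pyGetD times 0 (0, 0)).1
  let work_to_finish_queue : Int := (PySem.List.pyGetD times 0 (0, 0)).2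
  let amount_of_times : Int := times.length
  (PySem.List.pyRange 0 amount_of_times 1).foldl
    (fun (st : Int × Int) i =>
      let cur := PySem.List.pyGetD times (amount_of_times - 1 - i) (0, 0)
      if amount_of_times - 1 - i - 1 ≥ 0 then
        let prev := PySem.List.pyGetD times (amount_of_times - 1 - i - 1) (0, 0)
        if prev.2 > cur.2 then (cur.1, cur.2) else st
      else st)
    (amount_of_machines, work_to_finish_queue)

-- ===== PORT B =====
-- forward scan over consecutive pairs (zip(times, times[1:])), stopping at the first descent
def pvFirstDescent : List (Int × Int) → Option (Int × Int)
  | p :: c :: rest => if p.2 > c.2 then some c else pvFirstDescent (c :: rest)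
  | _ => none

def get_lowest_work_time_and_machines_to_start_from_times_touple_list_py_alt (times : List (Int × Int)) : Int × Int :=
  match times with
  | [] => (0, 0)  -- Python B raises IndexError on [] (times[0]); outside Pre_
  | h :: _ =>
    match pvFirstDescent times with
    | some c => c
    | none => h

-- ===== PRECONDITION & SPEC =====
-- Pre_ excludes exactly the empty list, on which both Pythons raise IndexError (times[0]).
def Pre_get_lowest_work_time_and_machines_to_start_from_times_touple_list_py (times : List (Int × Int)) : Prop := times ≠ []
instance (times : List (Int × Int)) : Decidable (Pre_get_lowest_work_time_and_machines_to_start_from_times_touple_list_py times) := by unfold Pre_get_lowest_work_time_and_machines_to_start_from_times_touple_list_py; infer_instance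

def pvWitness_get_lowest_work_time_and_machines_to_start_from_times_touple_list_py : (List (Int × Int)) := [(4, 7), (2, 3), (5, 9)]

def Spec_get_lowest_work_time_and_machines_to_start_from_times_touple_list_py (times : List (Int × Int)) (out : Int × Int) : Prop := out = get_lowest_work_time_and_machines_to_start_from_times_touple_list_py_alt times
instance (times : List (Int × Int)) (out : Int × Int) : Decidable (Spec_get_lowest_work_time_and_machines_to_start_from_times_touple_list_py times out) := by unfold Spec_get_lowest_work_time_and_machines_to_start_from_times_touple_list_py; infer_instance

-- ===== CLAIM (what is proved, stated in full; the proofs are below) =====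
def Claim_equal_get_lowest_work_time_and_machines_to_start_from_times_touple_list_py : Prop := ∀ (times : List (Int × Int)), Dom_get_lowest_work_time_and_machines_to_start_from_times_touple_list_py times → Pre_get_lowest_work_time_and_machines_to_start_from_times_touple_list_py times → Spec_get_lowest_work_time_and_machines_to_start_from_times_touple_list_py times (get_lowest_work_time_and_machines_to_start_from_times_touple_list_py times)

-- ===== LEMMAS AND PROOFS =====

-- (n-1-i for i in range(n)) is range(n) reversed
lemma pvRevRange (m : Nat) : (List.range (m + 1)).map (fun i => m - i) = (List.range (m + 1)).reverse := by
  induction m with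
  | zero => decide
  | succ m ih =>
    conv_lhs => rw [List.range_succ_eq_map (n := m + 1)]
    rw [List.map_cons, List.map_map]
    have hc : ((fun i => m + 1 - i) ∘ Nat.succ) = (fun i => m - i) := by
      funext i; simp only [Function.comp]; omega
    rw [hc, ih]
    rw [show List.range (m + 1 + 1) = List.range (m + 1) ++ [m + 1] from List.range_succ]
    simp

-- B's forward scan equals the foldr over adjacent-pair indices (first qualifying index wins)
lemma pvCore : ∀ (l : List (Int × Int)) (d : Int × Int),
    (List.range (l.length - 1)).foldr
      (fun j st => if (l.getD j (0, 0)).2 > (l.getD (j + 1) (0, 0)).2 then l.getD (j + 1) (0, 0) else st) d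
    = (pvFirstDescent l).getD d := by
  intro l
  induction l with
  | nil => intro d; simp [pvFirstDescent]
  | cons p t ih =>
    intro d
    cases t with
    | nil => simp [pvFirstDescent]
    | cons c r =>
      rw [show (p :: c :: r).length - 1 = r.length + 1 from by simp,
          List.range_succ_eq_map, List.foldr_cons, List.foldr_map]
      have hbody :
          (List.range r.length).foldr
            (fun (j : Nat) st =>
              if ((p :: c :: r).getD j.succ (0, 0)).2 > ((p :: c :: r).getD (j.succ + 1) (0, 0)).2
              then (p :: c :: r).getD (j.succ + 1) (0, 0) else st) d
          = (pvFirstDescent (c :: r)).getD d := by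
        have hfun : (fun (j : Nat) st =>
              if ((p :: c :: r).getD j.succ (0, 0)).2 > ((p :: c :: r).getD (j.succ + 1) (0, 0)).2
              then (p :: c :: r).getD (j.succ + 1) (0, 0) else st)
            = (fun (j : Nat) st =>
              if ((c :: r).getD j (0, 0)).2 > ((c :: r).getD (j + 1) (0, 0)).2
              then (c :: r).getD (j + 1) (0, 0) else st) := by
          funext j st
          simp [Nat.succ_eq_add_one]
        rw [hfun, ← ih d, show (c :: r).length - 1 = r.length from by simp]
      rw [hbody]
      simp only [List.getD_cons_zero, List.getD_cons_succ, Nat.zero_add]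
      by_cases hpc : p.2 > c.2
      · simp [pvFirstDescent, hpc]
      · simp [pvFirstDescent, hpc]

-- the Nat-indexed loop body of A, at adjacent-pair position j (j ≥ 1 is A's bounds guard)
def pvStepA (l : List (Int × Int)) (j : Nat) (st : Int × Int) : Int × Int :=
  if 1 ≤ j then
    (if (l.getD (j - 1) (0, 0)).2 > (l.getD j (0, 0)).2 then l.getD j (0, 0) else st)
  else st

lemma pvA_cons (h : Int × Int) (t : List (Int × Int)) :
    get_lowest_work_time_and_machines_to_start_from_times_touple_list_py (h :: t)
    = (pvFirstDescent (h :: t)).getD h := by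
  unfold get_lowest_work_time_and_machines_to_start_from_times_touple_list_py
  dsimp only
  rw [PySem.List.pyGetD_zero_cons]
  rw [show (((h :: t).length : Nat) : Int) = ((t.length + 1 : Nat) : Int) from by simp]
  rw [PySem.List.pyRange_zero_nat (t.length + 1), List.foldl_map]
  set m := t.length with hm
  -- pointwise, A's Int-indexed body at i is pvStepA at j = m - i
  have hpoint : ∀ (st : Int × Int), ∀ i ∈ List.range (m + 1),
      (fun (st : Int × Int) (i : Int) =>
        if ((m + 1 : Nat) : Int) - 1 - i - 1 ≥ 0 then
          (if (PySem.List.pyGetD (h :: t) (((m + 1 : Nat) : Int) - 1 - i - 1) (0, 0)).2 >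
              (PySem.List.pyGetD (h :: t) (((m + 1 : Nat) : Int) - 1 - i) (0, 0)).2
           then ((PySem.List.pyGetD (h :: t) (((m + 1 : Nat) : Int) - 1 - i) (0, 0)).1,
                 (PySem.List.pyGetD (h :: t) (((m + 1 : Nat) : Int) - 1 - i) (0, 0)).2)
           else st)
        else st) st (i : Int)
      = pvStepA (h :: t) (m - i) st := by
    intro st i hi
    simp only [List.mem_range] at hi
    beta_reduce
    have e1 : ((m + 1 : Nat) : Int) - 1 - (i : Int) = ((m - i : Nat) : Int) := by omega
    rw [e1, PySem.List.pyGetD_natCast]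
    unfold pvStepA
    by_cases hle : 1 ≤ m - i
    · have e3 : ((m - i : Nat) : Int) - 1 = ((m - i - 1 : Nat) : Int) := by omega
      rw [if_pos (by omega : ((m - i : Nat) : Int) - 1 ≥ 0), e3,
          PySem.List.pyGetD_natCast, if_pos hle]
    · rw [if_neg (by omega : ¬ ((m - i : Nat) : Int) - 1 ≥ 0), if_neg hle]
  rw [PySem.List.foldl_congr_mem _ _ (fun st i => pvStepA (h :: t) (m - i) st) _ hpoint]
  -- the backward index walk m - i over range (m+1) is range (m+1) reversed
  have hmap := (List.foldl_map (f := fun i => m - i)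
      (g := fun (st : Int × Int) (j : Nat) => pvStepA (h :: t) j st)
      (l := List.range (m + 1)) (init := ((h.1, h.2) : Int × Int))).symm
  beta_reduce at hmap
  rw [hmap, pvRevRange m, List.foldl_reverse]
  -- peel off the no-op term j = 0, leaving the foldr over adjacent-pair indices
  rw [List.range_succ_eq_map, List.foldr_cons, List.foldr_map]
  have hfun : (fun (i : Nat) (st : Int × Int) => pvStepA (h :: t) i.succ st)
      = (fun (j : Nat) st =>
          if ((h :: t).getD j (0, 0)).2 > ((h :: t).getD (j + 1) (0, 0)).2
          then (h :: t).getD (j + 1) (0, 0) else st) := by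
    funext j st
    unfold pvStepA
    simp [Nat.succ_eq_add_one]
  rw [hfun]
  have hcore := pvCore (h :: t) (h.1, h.2)
  rw [show (h :: t).length - 1 = m from by simp [hm]] at hcore
  rw [hcore]
  unfold pvStepA
  simp

lemma pvB_cons (h : Int × Int) (t : List (Int × Int)) :
    get_lowest_work_time_and_machines_to_start_from_times_touple_list_py_alt (h :: t)
    = (pvFirstDescent (h :: t)).getD h := by
  unfold get_lowest_work_time_and_machines_to_start_from_times_touple_list_py_alt
  cases pvFirstDescent (h :: t) <;> simp

-- ===== VERDICT (by name: the statement is the Claim_ definition above) =====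
theorem get_lowest_work_time_and_machines_to_start_from_times_touple_list_py_spec : Claim_equal_get_lowest_work_time_and_machines_to_start_from_times_touple_list_py := by
  intro times _ hpre
  obtain ⟨h, t, rfl⟩ := List.exists_cons_of_ne_nil hpre
  unfold Spec_get_lowest_work_time_and_machines_to_start_from_times_touple_list_py
  rw [pvA_cons, pvB_cons]
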